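-- pv_equiv track=rewrite | github.com/TianYuan-Liu/tusco-paper | src/tusco_selector/pipeline/splice_tss_check.py | _build_junction_index
-- ===== SOURCE A (Python) =====
-- from collections import defaultdict
-- from typing import Dict, List, Set, Tuple
--
-- JunctionKey = Tuple[str, int, int, str]  # (chrom, start, end, strand)
--
-- def _build_junction_index(
--     bed_cov: dict[JunctionKey, int]
-- ) -> dict[Tuple[str, str], list[Tuple[int, int, int]]]:
--     """Return mapping *(chrom, strand) → sorted list of (start, end, cov)* for quick region queries."""
--     index: dict[Tuple[str, str], list[Tuple[int, int, int]]] = defaultdict(list)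
--     for (chrom, s, e, strand), cov in bed_cov.items():
--         index[(chrom, strand)].append((s, e, cov))
--     # Sort each list by start coordinate so we can break early when *start* exceeds region end
--     for lst in index.values():
--         lst.sort(key=lambda x: x[0])
--     return index
-- ===== SOURCE B (Python) =====
-- from collections import defaultdict
-- from typing import Dict, List, Set, Tuple
--
-- JunctionKey = Tuple[str, int, int, str]  # (chrom, start, end, strand)
--
-- def _build_junction_index(
--     bed_cov: dict[JunctionKey, int]
-- ) -> dict[Tuple[str, str], list[Tuple[int, int, int]]]:
--     """Declarative group-by: list the distinct (chrom, strand) keys in first-occurrence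
--     order, then build each group's sorted list directly by filtering bed_cov."""
--     keys = dict.fromkeys((chrom, strand) for (chrom, _s, _e, strand) in bed_cov)
--     index: dict[Tuple[str, str], list[Tuple[int, int, int]]] = defaultdict(list)
--     for key in keys:
--         index[key] = sorted(
--             ((s, e, cov) for (chrom, s, e, strand), cov in bed_cov.items()
--              if (chrom, strand) == key),
--             key=lambda x: x[0],
--         )
--     return index
-- ===== Notes on version B (the rewrite author's own statement) =====
-- stated objective: alternative
-- what changed: Replaces the incremental append-into-defaultdict pass followed by per-list in-place sorts with a declarative group-by: dedup the (chrom,strand) keys once in first-occurrence order, then build each group's sorted list directly by a filtering comprehension over bed_cov.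
import Mathlib
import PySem

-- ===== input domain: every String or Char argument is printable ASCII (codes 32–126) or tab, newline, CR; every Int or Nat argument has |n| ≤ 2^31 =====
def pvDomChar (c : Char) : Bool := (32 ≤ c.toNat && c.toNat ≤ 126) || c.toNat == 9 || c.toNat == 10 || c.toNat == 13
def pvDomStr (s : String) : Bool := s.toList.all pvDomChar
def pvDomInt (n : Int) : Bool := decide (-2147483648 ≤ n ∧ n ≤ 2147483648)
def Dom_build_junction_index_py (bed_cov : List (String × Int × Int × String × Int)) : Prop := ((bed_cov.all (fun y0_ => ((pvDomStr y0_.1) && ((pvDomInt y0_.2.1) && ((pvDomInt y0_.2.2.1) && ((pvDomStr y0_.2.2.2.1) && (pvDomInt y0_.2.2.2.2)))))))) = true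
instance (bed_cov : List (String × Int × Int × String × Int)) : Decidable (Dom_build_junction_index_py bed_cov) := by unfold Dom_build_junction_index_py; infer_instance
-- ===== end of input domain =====

-- B replaces A's incremental append-into-defaultdict pass (then in-place sorts) by a
-- declarative group-by: dedup the keys once, then filter-and-sort each group directly
-- (alternative decomposition, same results). Equivalence proved for the return value.


-- ===== PORT A =====
-- for (chrom, s, e, strand), cov in bed_cov.items(): index[(chrom, strand)].append((s, e, cov))
-- then each list is sorted in place by start; the returned dict is its items list.
def build_junction_index_py (bed_cov : List (String × Int × Int × String × Int)) : List (String × String × List (Int × Int × Int)) :=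
  let index : PySem.Dict (String × String) (List (Int × Int × Int)) :=
    bed_cov.foldl
      (fun d r => d.modify (r.1, r.2.2.2.1) [] (fun lst => lst ++ [(r.2.1, r.2.2.1, r.2.2.2.2)]))
      PySem.Dict.empty
  index.items.map (fun p => (p.1.1, p.1.2, PySem.List.sorted p.2 (fun x => x.1) false))

-- ===== PORT B =====
-- keys = dict.fromkeys(...) in first-occurrence order; each group built by filter + sorted.
def build_junction_index_py_alt (bed_cov : List (String × Int × Int × String × Int)) : List (String × String × List (Int × Int × Int)) :=
  let keys := PySem.List.dedup (bed_cov.map (fun r => (r.1, r.2.2.2.1)))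
  keys.map (fun k =>
    (k.1, k.2,
      PySem.List.sorted
        ((bed_cov.filter (fun r => (r.1, r.2.2.2.1) == k)).map (fun r => (r.2.1, r.2.2.1, r.2.2.2.2)))
        (fun x => x.1) false))

-- ===== PRECONDITION & SPEC =====
def Spec_build_junction_index_py (bed_cov : List (String × Int × Int × String × Int)) (out : List (String × String × List (Int × Int × Int))) : Prop := out = build_junction_index_py_alt bed_cov
instance (bed_cov : List (String × Int × Int × String × Int)) (out : List (String × String × List (Int × Int × Int))) : Decidable (Spec_build_junction_index_py bed_cov out) := by unfold Spec_build_junction_index_py; infer_instance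

-- ===== CLAIM (what is proved, stated in full; the proofs are below) =====
def Claim_equal_build_junction_index_py : Prop := ∀ (bed_cov : List (String × Int × Int × String × Int)), Dom_build_junction_index_py bed_cov → Spec_build_junction_index_py bed_cov (build_junction_index_py bed_cov)

-- ===== LEMMAS AND PROOFS =====

-- A dict with Nodup keys is its keys list paired with the looked-up values.
theorem items_eq_keys_map_getD {κ ν : Type} [BEq κ] [LawfulBEq κ]
    (d : PySem.Dict κ ν) (h : d.keys.Nodup) (d0 : ν) :
    d.items = d.keys.map (fun k => (k, d.getD k d0)) := by
  apply List.ext_getElem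
  · simp [PySem.Dict.keys]
  · intro i h1 h2
    have h2' : i < d.keys.length := by simpa using h2
    have hk : d.keys = d.items.map (·.1) := rfl
    have hik : (d.items[i]).1 = d.keys[i]'h2' := by
      simp [hk]
    have hmem : ((d.items[i]).1, (d.items[i]).2) ∈ d.items := by
      simp [List.getElem_mem h1]
    have hval : d.getD (d.items[i]).1 d0 = (d.items[i]).2 :=
      PySem.Dict.getD_of_mem_items d hmem h d0
    simp only [List.getElem_map]
    rw [← hik, hval]

theorem build_junction_index_py_spec' (bed_cov : List (String × Int × Int × String × Int)) :
    build_junction_index_py bed_cov = build_junction_index_py_alt bed_cov := by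
  unfold build_junction_index_py build_junction_index_py_alt
  dsimp only
  set l := bed_cov.map (fun r => ((r.1, r.2.2.2.1), (r.2.1, r.2.2.1, r.2.2.2.2))) with hl
  have hfold :
      bed_cov.foldl
        (fun d r => d.modify (r.1, r.2.2.2.1) [] (fun lst => lst ++ [(r.2.1, r.2.2.1, r.2.2.2.2)]))
        (PySem.Dict.empty : PySem.Dict (String × String) (List (Int × Int × Int)))
      = l.foldl (fun d p => d.modify p.1 [] (fun lst => lst ++ [p.2])) PySem.Dict.empty := by
    rw [hl, List.foldl_map]
  rw [hfold]
  set D := l.foldl (fun d p => d.modify p.1 [] (fun lst => lst ++ [p.2])) PySem.Dict.empty with hD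
  have hkeys : D.keys = PySem.Set.ofList (l.map (·.1)) := by
    rw [hD]
    have := PySem.Dict.keys_foldl_modify_key (l := l) (key := (·.1))
      (d0 := ([] : List (Int × Int × Int)))
      (f := fun (_ : PySem.Dict (String × String) (List (Int × Int × Int))) p =>
              (fun lst => lst ++ [p.2]))
      (d := PySem.Dict.empty)
    simpa [PySem.Set.update, PySem.Set.ofList, PySem.Dict.keys_empty] using this
  have hnodup : D.keys.Nodup := by
    rw [hkeys]; exact PySem.Set.nodup_ofList _
  have hgetD : ∀ k, D.getD k [] = (l.filter (fun p => p.1 == k)).map (·.2) := by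
    intro k
    rw [hD]
    simpa using PySem.Dict.getD_foldl_modify_append (l := l)
      (d := (PySem.Dict.empty : PySem.Dict (String × String) (List (Int × Int × Int)))) (c := k)
  rw [items_eq_keys_map_getD D hnodup [], hkeys]
  have hmapkeys : l.map (·.1) = bed_cov.map (fun r => (r.1, r.2.2.2.1)) := by
    rw [hl, List.map_map]; rfl
  rw [hmapkeys, List.map_map]
  rw [← PySem.List.dedup_eq_ofList]
  apply List.map_congr_left
  intro k hk
  simp only [Function.comp]
  congr 1
  congr 1
  rw [hgetD k, hl, List.filter_map, List.map_map]
  rfl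

-- ===== VERDICT (by name: the statement is the Claim_ definition above) =====
theorem build_junction_index_py_spec : Claim_equal_build_junction_index_py := by
  intro bed_cov _
  exact build_junction_index_py_spec' bed_cov
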